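-- pv_equiv track=rewrite | github.com/haedal-uni/algorithmHub | 프로그래머스/unrated/181884. n보다 커질 때까지 더하기/n보다 커질 때까지 더하기.py | solution
-- ===== SOURCE A (Python) =====
-- def solution(numbers, n):
--     answer = 0
--     while (True):
--         for i in range(len(numbers)):
--             answer += numbers[i]
--             if answer > n:
--                 return answer
--                 break
-- ===== SOURCE B (Python) =====
-- def solution(numbers, n):
--     # build prefix sums once, then skip all full cycles at a stroke by floor division
--     pref = []
--     s = 0
--     for x in numbers:
--         s += x
--         pref.append(s)
--     for p in pref:
--         if p > n:
--             return p
--     k = (n - max(pref)) // s + 1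
--     for p in pref:
--         if k * s + p > n:
--             return k * s + p
-- ===== Notes on version B (the rewrite author's own statement) =====
-- stated objective: alternative
-- what changed: A adds the numbers one by one around the cycle until the running sum exceeds n; B builds the prefix sums of one cycle once, skips all full cycles at a stroke with a floor division by the cycle sum, and scans a single final cycle.
import Mathlib
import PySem

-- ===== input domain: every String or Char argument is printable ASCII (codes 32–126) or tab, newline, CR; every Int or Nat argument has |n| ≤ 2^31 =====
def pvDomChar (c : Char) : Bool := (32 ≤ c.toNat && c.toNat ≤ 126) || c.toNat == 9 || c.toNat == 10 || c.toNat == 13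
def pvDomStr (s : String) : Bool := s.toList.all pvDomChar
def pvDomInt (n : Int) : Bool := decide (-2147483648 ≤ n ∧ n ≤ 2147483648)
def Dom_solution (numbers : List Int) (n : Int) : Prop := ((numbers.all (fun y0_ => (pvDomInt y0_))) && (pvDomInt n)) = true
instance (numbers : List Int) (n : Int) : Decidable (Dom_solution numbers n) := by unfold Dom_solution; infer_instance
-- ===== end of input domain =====

-- B replaces A's one-by-one cyclic accumulation by prefix sums plus a division jump over whole
-- cycles (alternative algorithm; return value only).

-- ===== PORT A =====
-- one pass of the Python 'for i in range(len(numbers))' body: .inl = early return, .inr = new answer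
def runCycle : List Int → Int → Int → Sum Int Int
  | [], _, acc => .inr acc
  | x :: xs, n, acc =>
      let a := acc + x
      if a > n then .inl a else runCycle xs n a

-- Python's unbounded 'while True'; the fuel is a totality guard only and is proved sufficient on Pre_
def loopA : Nat → List Int → Int → Int → Int
  | 0, _, _, _ => 0
  | f+1, numbers, n, acc =>
      match runCycle numbers n acc with
      | .inl ans => ans
      | .inr acc' => loopA f numbers n acc'

def fuelA (numbers : List Int) (n : Int) : Nat :=
  (max n 0).toNat + (numbers.map Int.natAbs).sum + 2

def solution (numbers : List Int) (n : Int) : Int :=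
  loopA (fuelA numbers n) numbers n 0

-- ===== PORT B =====
def buildPref : List Int → Int → List Int
  | [], _ => []
  | x :: xs, s => (s + x) :: buildPref xs (s + x)

def firstOver : List Int → Int → Option Int
  | [], _ => none
  | p :: ps, n => if p > n then some p else firstOver ps n

def firstJump : List Int → Int → Int → Int → Option Int
  | [], _, _, _ => none
  | p :: ps, k, s, n => if k * s + p > n then some (k * s + p) else firstJump ps k s n

def solution_alt (numbers : List Int) (n : Int) : Int :=
  let pref := buildPref numbers 0
  let s := List.foldl (fun a x => a + x) 0 numbers
  match firstOver pref n with
  | some p => p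
  | none =>
    match PySem.List.max? pref (fun y => y) with
    | none => 0   -- Python: max([]) raises ValueError; outside Pre_
    | some m =>
      let k := PySem.Int.floordiv (n - m) s + 1
      match firstJump pref k s n with
      | some v => v
      | none => 0  -- Python: falls through returning None; outside Pre_

-- ===== PRECONDITION & SPEC =====
def prefList (xs : List Int) : List Int :=
  (List.range xs.length).map (fun i => (xs.take (i+1)).sum)

-- Pre_ excludes exactly the inputs on which Python A never returns (infinite loop): the empty
-- list, and lists whose full-cycle sum is ≤ 0 while no first-cycle prefix sum exceeds n.
def Pre_solution (numbers : List Int) (n : Int) : Prop :=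
  numbers ≠ [] ∧ ((∃ p ∈ prefList numbers, p > n) ∨ 0 < numbers.sum)
instance (numbers : List Int) (n : Int) : Decidable (Pre_solution numbers n) := by
  unfold Pre_solution; infer_instance

def pvWitness_solution : List Int × Int := ([1], 5)

def Spec_solution (numbers : List Int) (n : Int) (out : Int) : Prop := out = solution_alt numbers n
instance (numbers : List Int) (n : Int) (out : Int) : Decidable (Spec_solution numbers n out) := by
  unfold Spec_solution; infer_instance

-- ===== CLAIM (what is proved, stated in full; the proofs are below) =====
def Claim_equal_solution : Prop := ∀ (numbers : List Int) (n : Int), Dom_solution numbers n → Pre_solution numbers n → Spec_solution numbers n (solution numbers n)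

-- ===== LEMMAS AND PROOFS =====

theorem buildPref_shift (xs : List Int) : ∀ (a b : Int),
    buildPref xs (a + b) = (buildPref xs b).map (fun p => a + p) := by
  induction xs with
  | nil => intro a b; simp [buildPref]
  | cons x xs ih =>
      intro a b
      simp only [buildPref, List.map]
      rw [show a + b + x = a + (b + x) by ring, ih a (b + x)]

theorem prefList_eq (xs : List Int) : prefList xs = buildPref xs 0 := by
  induction xs with
  | nil => simp [prefList, buildPref]
  | cons x xs ih =>
      have hsh : buildPref xs x = (buildPref xs 0).map (fun p => x + p) := by
        have := buildPref_shift xs x 0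
        simpa using this
      simp only [prefList, buildPref, List.length_cons, List.range_succ_eq_map, List.map_cons,
        List.map_map]
      rw [show (0:Int) + x = x by ring]
      congr 1
      · simp
      · rw [hsh, ← ih]
        simp only [prefList, List.map_map]
        apply List.map_congr_left
        intro i _
        simp [Function.comp, List.take_succ_cons]

theorem runCycle_eq (xs : List Int) : ∀ (n acc : Int),
    runCycle xs n acc =
      (match firstOver (buildPref xs acc) n with
       | some p => Sum.inl p
       | none => Sum.inr (acc + xs.sum)) := by
  induction xs with
  | nil => intro n acc; simp [runCycle, buildPref, firstOver]
  | cons x xs ih =>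
      intro n acc
      simp only [runCycle, buildPref, firstOver]
      by_cases h : acc + x > n
      · simp [h]
      · simp only [if_neg h]
        rw [ih n (acc + x)]
        cases hfo : firstOver (buildPref xs (acc + x)) n with
        | some p => simp
        | none => simp; ring

theorem firstOver_eq_none_iff (l : List Int) (n : Int) :
    firstOver l n = none ↔ ∀ p ∈ l, p ≤ n := by
  induction l with
  | nil => simp [firstOver]
  | cons p ps ih =>
      by_cases h : p > n
      · simp [firstOver, h]
      · simp [firstOver, h, ih]; omega

theorem firstJump_eq (l : List Int) (k s n : Int) :
    firstJump l k s n = firstOver (l.map (fun p => k * s + p)) n := by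
  induction l with
  | nil => simp [firstJump, firstOver]
  | cons p ps ih => simp [firstJump, firstOver, ih]

theorem foldl_add_sum (xs : List Int) : ∀ a : Int,
    List.foldl (fun a x => a + x) a xs = a + xs.sum := by
  induction xs with
  | nil => simp
  | cons x xs ih => intro a; simp [List.foldl, ih]; ring

theorem buildPref_lower (xs : List Int) : ∀ (acc p : Int),
    p ∈ buildPref xs acc → acc - ((xs.map Int.natAbs).sum : Int) ≤ p := by
  induction xs with
  | nil => simp [buildPref]
  | cons x xs ih =>
      intro acc p hp
      simp only [buildPref, List.mem_cons] at hp
      have habs : -(x.natAbs : Int) ≤ x := by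
        rcases Int.natAbs_eq x with h | h <;> omega
      have hsum : (((x :: xs).map Int.natAbs).sum : Int)
          = (x.natAbs : Int) + ((xs.map Int.natAbs).sum : Int) := by
        simp
      have hrest : (0:Int) ≤ ((xs.map Int.natAbs).sum : Int) := Int.natCast_nonneg _
      rcases hp with h | h
      · rw [hsum]; omega
      · have := ih (acc + x) p h
        rw [hsum]; omega

theorem loopA_skip : ∀ (k f : Nat) (numbers : List Int) (n m acc : Int),
    (∀ p ∈ buildPref numbers 0, p ≤ m) →
    (∀ j : Nat, j < k → acc + (j : Int) * numbers.sum + m ≤ n) →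
    loopA (k + f) numbers n acc = loopA f numbers n (acc + (k : Int) * numbers.sum) := by
  intro k
  induction k with
  | zero => intro f numbers n m acc _ _; simp
  | succ k ih =>
      intro f numbers n m acc hub hsk
      have h0 : acc + m ≤ n := by have := hsk 0 (by omega); simpa using this
      have hnone : firstOver (buildPref numbers acc) n = none := by
        rw [firstOver_eq_none_iff]
        intro p hp
        have : buildPref numbers acc = (buildPref numbers 0).map (fun q => acc + q) := by
          have := buildPref_shift numbers acc 0; simpa using this
        rw [this] at hp
        obtain ⟨q, hq, rfl⟩ := List.mem_map.mp hp
        have := hub q hq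
        omega
      have hstep : (k + 1) + f = (k + f) + 1 := by omega
      rw [hstep]
      show loopA ((k + f) + 1) numbers n acc = _
      simp only [loopA, runCycle_eq, hnone]
      have := ih f numbers n m (acc + numbers.sum) hub (by
        intro j hj
        have := hsk (j + 1) (by omega)
        push_cast at this ⊢
        linarith)
      rw [this]
      congr 1
      push_cast
      ring

theorem buildPref_ne_nil (xs : List Int) (acc : Int) (h : xs ≠ []) :
    buildPref xs acc ≠ [] := by
  cases xs with
  | nil => exact absurd rfl h
  | cons x xs => simp [buildPref]

-- ===== VERDICT (by name: the statement is the Claim_ definition above) =====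
theorem solution_spec : Claim_equal_solution := by
  intro numbers n _dom hpre
  obtain ⟨hne, hcase⟩ := hpre
  unfold Spec_solution solution solution_alt
  rw [foldl_add_sum]
  simp only [Int.zero_add]
  set pref := buildPref numbers 0 with hprefdef
  set S := numbers.sum with hSdef
  cases h1 : firstOver pref n with
  | some p =>
      -- first cycle already returns
      have hfuel : fuelA numbers n = ((max n 0).toNat + (numbers.map Int.natAbs).sum + 1) + 1 := by
        unfold fuelA; omega
      rw [hfuel]
      simp only [loopA, runCycle_eq, ← hprefdef, h1]
  | none =>
      have hall : ∀ p ∈ pref, p ≤ n := (firstOver_eq_none_iff pref n).mp h1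
      have hprefne : pref ≠ [] := buildPref_ne_nil numbers 0 hne
      have hS : 0 < S := by
        rcases hcase with ⟨p, hp, hpn⟩ | hS
        · rw [prefList_eq] at hp
          exact absurd (hall p hp) (by omega)
        · exact hS
      obtain ⟨m, hm⟩ : ∃ m, PySem.List.max? pref (fun y => y) = some m := by
        cases hmx : PySem.List.max? pref (fun y => y) with
        | none => exact absurd ((PySem.List.max?_eq_none_iff pref (fun y => y)).mp hmx) hprefne
        | some m => exact ⟨m, rfl⟩
      have hmmem : m ∈ pref := PySem.List.max?_mem hm
      have hmub : ∀ p ∈ pref, p ≤ m := fun p hp => PySem.List.max?_isMax hm p hp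
      have hmn : m ≤ n := hall m hmmem
      simp only [hm]
      set q := PySem.Int.floordiv (n - m) S with hqdef
      have hq1 : q * S ≤ n - m := by
        have := (PySem.Int.le_floordiv_iff_mul_le (a := n - m) (b := S) (q := q) hS).mp le_rfl
        exact this
      have hq2 : n - m < (q + 1) * S := by
        have := (PySem.Int.floordiv_lt_iff_lt_mul (a := n - m) (b := S) (q := q + 1) hS).mp
          (by omega)
        exact this
      have hq0 : 0 ≤ q := by
        have := (PySem.Int.le_floordiv_iff_mul_le (a := n - m) (b := S) (q := 0) hS).mpr
          (by omega)
        exact this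
      -- the Nat number of skipped cycles
      set kN : Nat := (q + 1).toNat with hkNdef
      have hkcast : (kN : Int) = q + 1 := Int.toNat_of_nonneg (by omega)
      -- fuel is large enough
      have hmlow : -((numbers.map Int.natAbs).sum : Int) ≤ m := by
        have := buildPref_lower numbers 0 m hmmem
        omega
      have hqle : q ≤ n - m := by nlinarith
      have hfuelbig : kN + 1 ≤ fuelA numbers n := by
        have h1' : (kN : Int) ≤ n - m + 1 := by omega
        have h2' : n ≤ ((max n 0).toNat : Int) := by
          rw [Int.toNat_of_nonneg (le_max_right n 0)]; exact le_max_left n 0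
        have h3 : (kN : Int) + 1 ≤ ((max n 0).toNat : Int) + ((numbers.map Int.natAbs).sum : Int) + 2 := by
          omega
        unfold fuelA
        exact_mod_cast h3
      obtain ⟨f, hf1, hf⟩ : ∃ f : Nat, 1 ≤ f ∧ fuelA numbers n = kN + f :=
        ⟨fuelA numbers n - kN, by omega, by omega⟩
      rw [hf]
      have hskip := loopA_skip kN f numbers n m 0 hmub (by
        intro j hj
        rw [← hSdef]
        have hjq : (j : Int) ≤ q := by omega
        have : (j : Int) * S ≤ q * S := by
          exact mul_le_mul_of_nonneg_right hjq (le_of_lt hS)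
        omega)
      rw [← hSdef] at hskip
      rw [hskip]
      simp only [Int.zero_add]
      -- final cycle: returns, and equals B's jump scan
      obtain ⟨f', rfl⟩ : ∃ f', f = f' + 1 := ⟨f - 1, by omega⟩
      have hsh : buildPref numbers ((kN : Int) * S) = pref.map (fun p => (kN : Int) * S + p) := by
        have := buildPref_shift numbers ((kN : Int) * S) 0
        simpa [← hprefdef] using this
      have hfj : firstJump pref (q + 1) S n = firstOver (buildPref numbers ((kN : Int) * S)) n := by
        rw [firstJump_eq, hsh, hkcast]
      cases h2 : firstOver (buildPref numbers ((kN : Int) * S)) n with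
      | none =>
          exfalso
          have := (firstOver_eq_none_iff _ n).mp h2 ((kN : Int) * S + m)
            (by rw [hsh]; exact List.mem_map.mpr ⟨m, hmmem, rfl⟩)
          rw [hkcast] at this
          nlinarith
      | some v =>
          simp only [loopA, runCycle_eq, h2]
          rw [hfj, h2]
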